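-- pv_equiv track=rewrite | github.com/Bankde/codepickle | tests/portability/test_dump.py | loop
-- ===== SOURCE A (Python) =====
-- def loop(i):
--     t = 0
--     for idx in range(i):
--         t *= idx
--     while t > 10:
--         t += 2
--         t //= 4
--     for idx in range(i):
--         if t > 20:
--             break
--         elif t == 15:
--             t += 1
--             continue
--         t += 10
--     return t
-- ===== SOURCE B (Python) =====
-- def loop(i):
--     # closed form: A's first loop keeps t at 0, the while never runs,
--     # and the last loop adds 10 at most three times (clamped at i steps)
--     return 10 * min(max(i, 0), 3)
-- ===== Notes on version B (the rewrite author's own statement) =====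
-- stated objective: simpler
-- what changed: Replaced A's three loops (a multiply loop that keeps t at zero, a while loop that never runs, and a loop adding ten up to three times) with a single closed-form clamp expression.
import Mathlib
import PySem

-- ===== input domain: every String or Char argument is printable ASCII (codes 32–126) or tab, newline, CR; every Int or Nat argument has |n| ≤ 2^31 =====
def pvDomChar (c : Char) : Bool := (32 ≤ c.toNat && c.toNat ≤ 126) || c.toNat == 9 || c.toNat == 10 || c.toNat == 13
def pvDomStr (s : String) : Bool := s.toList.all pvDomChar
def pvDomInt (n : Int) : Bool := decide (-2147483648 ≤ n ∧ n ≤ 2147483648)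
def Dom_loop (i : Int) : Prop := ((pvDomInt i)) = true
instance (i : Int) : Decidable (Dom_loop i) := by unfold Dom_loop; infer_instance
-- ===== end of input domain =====

-- B replaces A's three loops with the closed form 10*min(max(i,0),3); simpler.

-- ===== PORT A =====
-- while t > 10: t += 2; t //= 4   (terminates: t strictly decreases while > 10)
def loopWhile (t : Int) : Int :=
  if _h : t > 10 then loopWhile (PySem.Int.floordiv (t + 2) 4) else t
termination_by t.toNat
decreasing_by
  have h4 : (0:Int) < 4 := by omega
  rw [PySem.Int.floordiv_eq_ediv_of_pos h4]
  omega

-- for idx in range(i): if t > 20: break; elif t == 15: t += 1; continue; t += 10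
def loopFor2 (t : Int) : List Int → Int
  | [] => t
  | _ :: rest =>
      if t > 20 then t
      else if t = 15 then loopFor2 (t + 1) rest
      else loopFor2 (t + 10) rest

def loop (i : Int) : Int :=
  let t := (PySem.List.pyRange 0 i 1).foldl (fun t idx => t * idx) 0
  let t := loopWhile t
  loopFor2 t (PySem.List.pyRange 0 i 1)

-- ===== PORT B =====
def loop_alt (i : Int) : Int := 10 * min (max i 0) 3

-- ===== PRECONDITION & SPEC =====
def Spec_loop (i : Int) (out : Int) : Prop := out = loop_alt i
instance (i : Int) (out : Int) : Decidable (Spec_loop i out) := by unfold Spec_loop; infer_instance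

-- ===== CLAIM (what is proved, stated in full; the proofs are below) =====
def Claim_equal_loop : Prop := ∀ (i : Int), Dom_loop i → Spec_loop i (loop i)

-- ===== LEMMAS AND PROOFS =====

theorem foldl_mul_zero (l : List Int) : l.foldl (fun t idx => t * idx) 0 = 0 := by
  induction l with
  | nil => rfl
  | cons a l ih => simpa using ih

theorem loopWhile_zero : loopWhile 0 = 0 := by
  rw [loopWhile]; norm_num

theorem loopFor2_30 (l : List Int) : loopFor2 30 l = 30 := by
  cases l <;> simp [loopFor2]

-- ===== VERDICT (by name: the statement is the Claim_ definition above) =====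
theorem loop_spec : Claim_equal_loop := by
  intro i _
  unfold Spec_loop loop loop_alt
  show loopFor2 (loopWhile ((PySem.List.pyRange 0 i 1).foldl (fun t idx => t * idx) 0))
      (PySem.List.pyRange 0 i 1) = 10 * min (max i 0) 3
  rw [foldl_mul_zero, loopWhile_zero]
  rcases (by omega : i ≤ 0 ∨ 0 < i) with h0 | h0
  · rw [PySem.List.pyRange_one_eq_nil h0]
    simp [loopFor2]; omega
  · rw [PySem.List.pyRange_one_cons h0]
    rcases (by omega : i ≤ 1 ∨ 1 < i) with h1 | h1
    · rw [show (0:Int) + 1 = 1 by ring, PySem.List.pyRange_one_eq_nil h1]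
      simp [loopFor2]; omega
    · rw [show (0:Int) + 1 = 1 by ring, PySem.List.pyRange_one_cons h1]
      rcases (by omega : i ≤ 2 ∨ 2 < i) with h2 | h2
      · rw [show (1:Int) + 1 = 2 by ring, PySem.List.pyRange_one_eq_nil h2]
        simp [loopFor2]; omega
      · rw [show (1:Int) + 1 = 2 by ring, PySem.List.pyRange_one_cons h2]
        simp [loopFor2, loopFor2_30]; omega
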